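-- pv_equiv track=rewrite | github.com/fabrizzio-gz/MIT6009 | lab03/lab.py | actors_with_bacon_number
-- ===== SOURCE A (Python) =====
-- def actors_with_bacon_number(transformed_data, n):
--     """
--     Given a transformed data object, and an integer n, returns the
--     set of actors with Bacon number n.
--     """
--     actors = {4724}
--     # Start with Kevin Bacon as the only node
--     nodes = {4724}
--     previous = {4724}
--     while n:
--         actors = set()
--         if not nodes:
--             break
--         for node in nodes:
--             for actor in transformed_data[node]["actors"]:
--                 if not actor in previous:
--                     actors.add(actor)
--                     previous.add(actor)
--         n -= 1
--         # Set of actors becomes new set of nodes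
--         nodes = actors
--     return actors
-- ===== SOURCE B (Python) =====
-- def actors_with_bacon_number(transformed_data, n):
--     """
--     Given a transformed data object, and an integer n, returns the
--     set of actors with Bacon number n.
--     Single-queue BFS from Kevin Bacon (4724) keeping each reached actor's
--     Bacon number in a dict, instead of re-building level sets.
--     """
--     dist = {4724: 0}
--     queue = [4724]
--     i = 0
--     while i < len(queue):
--         node = queue[i]
--         i += 1
--         d = dist[node]
--         if d < n:
--             for actor in transformed_data[node]["actors"]:
--                 if actor not in dist:
--                     dist[actor] = d + 1
--                     queue.append(actor)
--     return {a for a, d in dist.items() if d == n}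
-- ===== Notes on version B (the rewrite author's own statement) =====
-- stated objective: simpler
-- what changed: A rebuilds a fresh frontier set and a 'previous' set on every level of a while-loop; B runs one FIFO-queue BFS from 4724 recording each reached actor's Bacon number in a dict and returns the actors whose number is n.
import Mathlib
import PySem

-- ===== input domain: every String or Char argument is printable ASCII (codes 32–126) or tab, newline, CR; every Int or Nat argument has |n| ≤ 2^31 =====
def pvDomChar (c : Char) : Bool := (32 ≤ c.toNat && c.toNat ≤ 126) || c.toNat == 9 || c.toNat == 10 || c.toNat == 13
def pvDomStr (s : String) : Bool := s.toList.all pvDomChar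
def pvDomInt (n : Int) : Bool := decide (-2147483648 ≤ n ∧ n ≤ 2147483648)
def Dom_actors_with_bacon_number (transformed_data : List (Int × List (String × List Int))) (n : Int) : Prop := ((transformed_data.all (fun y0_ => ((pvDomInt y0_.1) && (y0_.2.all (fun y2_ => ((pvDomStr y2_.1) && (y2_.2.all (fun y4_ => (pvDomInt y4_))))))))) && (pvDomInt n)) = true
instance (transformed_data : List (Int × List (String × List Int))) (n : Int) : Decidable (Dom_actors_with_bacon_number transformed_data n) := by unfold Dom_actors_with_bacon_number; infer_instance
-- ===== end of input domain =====

-- B replaces A's level-by-level frontier sets with one FIFO-queue BFS keeping each actor's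
-- Bacon number in a dict (objective: simpler); equivalence is about the RETURN value (neither
-- version mutates its arguments).

-- ===== PORT A =====
-- shared data access: transformed_data[node]["actors"] (Python dict semantics via PySem.Dict;
-- the Dict lookups default to [] only where Python would raise KeyError — outside Pre_ below)
def pvNbrs (td : List (Int × List (String × List Int))) (node : Int) : List Int :=
  (PySem.Dict.ofList ((PySem.Dict.ofList td).getD node [])).getD "actors" []

-- all ints occurring in any inner list of td: a bound on how many actors can ever be discovered
-- (used only to size the fuel of the loop recursions; proved sufficient below)
def pvPool (td : List (Int × List (String × List Int))) : List Int :=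
  td.flatMap (fun e => e.2.flatMap (fun q => q.2))

-- the body of A's 'for node in nodes: for actor in …' double loop (state: (actors, previous));
-- the resulting SETS do not depend on Python's set-iteration order, so folding in insertion
-- order is exact
def pvLevelA (td : List (Int × List (String × List Int)))
    (nodes : List Int) (st : PySem.Set Int × PySem.Set Int) :
    PySem.Set Int × PySem.Set Int :=
  nodes.foldl (fun st node =>
    (pvNbrs td node).foldl (fun st actor =>
      if PySem.Set.contains st.2 actor then st
      else (PySem.Set.add st.1 actor, PySem.Set.add st.2 actor)) st) st

-- A's 'while n:' loop; fuel-driven recursion (fuel proved sufficient in the lemmas below)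
def pvLoopA (td : List (Int × List (String × List Int))) :
    Nat → Int → PySem.Set Int → PySem.Set Int → PySem.Set Int → PySem.Set Int
  | 0, _, _, _, actors => actors
  | f+1, n, nodes, previous, actors =>
    if n = 0 then actors
    else
      if nodes = ([] : List Int) then PySem.Set.empty
      else
        let st := pvLevelA td nodes (PySem.Set.empty, previous)
        pvLoopA td f (n - 1) st.1 st.2 st.1

def actors_with_bacon_number (transformed_data : List (Int × List (String × List Int))) (n : Int) : List Int :=
  pvLoopA transformed_data (n.toNat + (pvPool transformed_data).length + 2) n
    (PySem.Set.ofList [4724]) (PySem.Set.ofList [4724]) (PySem.Set.ofList [4724])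

-- ===== PORT B =====
-- Source B's 'while i < len(queue):' loop: the unread prefix queue[i:] is the first argument;
-- dist[node] is ported as getD (never missing: every queued node is a dict key)
def pvBfs (td : List (Int × List (String × List Int))) (n : Int) :
    Nat → List Int → PySem.Dict Int Int → PySem.Dict Int Int
  | 0, _, dist => dist
  | _+1, [], dist => dist
  | f+1, node :: rest, dist =>
    let d := dist.getD node 0
    if d < n then
      let st := (pvNbrs td node).foldl
        (fun (st : PySem.Dict Int Int × List Int) actor =>
          if st.1.contains actor then st
          else (st.1.insert actor (d + 1), st.2 ++ [actor])) (dist, ([] : List Int))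
      pvBfs td n f (rest ++ st.2) st.1
    else pvBfs td n f rest dist

def actors_with_bacon_number_alt (transformed_data : List (Int × List (String × List Int))) (n : Int) : List Int :=
  let dist := pvBfs transformed_data n ((pvPool transformed_data).length + 2)
    [4724] (PySem.Dict.ofList [(4724, 0)])
  PySem.Set.ofList ((dist.items.filter (fun p => p.2 == n)).map (fun p => p.1))

-- ===== PRECONDITION & SPEC =====
-- a node's entry is well formed: it is a key of the dict and its value has an "actors" key
def pvOk (td : List (Int × List (String × List Int))) (x : Int) : Bool :=
  (PySem.Dict.ofList td).contains x &&
  (PySem.Dict.ofList ((PySem.Dict.ofList td).getD x [])).contains "actors"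

-- the set of graph nodes reachable from 4724 in at most k edge steps (neighbours as in pvNbrs);
-- a property of the input graph, not of either algorithm's run
def pvReachSet (td : List (Int × List (String × List Int))) : Nat → List Int
  | 0 => [4724]
  | k+1 => PySem.Set.ofList
      (pvReachSet td k ++ (pvReachSet td k).flatMap (pvNbrs td))

-- Pre_ excludes EXACTLY the inputs on which Python A raises KeyError: A looks up the entry of
-- every node at Bacon distance < n (for n < 0: of every reachable node, since 'while n:' only
-- stops on an empty frontier), so A returns normally iff every such reachable node has a
-- well-formed entry.  (The step bound min(n-1, |pool|+1) is exact: reachability from one start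
-- node stabilises after at most |pool|+1 steps.)
def Pre_actors_with_bacon_number (transformed_data : List (Int × List (String × List Int))) (n : Int) : Prop :=
  n = 0 ∨
    ∀ x ∈ pvReachSet transformed_data
        (if n < 0 then (pvPool transformed_data).length + 1
         else min (n.toNat - 1) ((pvPool transformed_data).length + 1)),
      pvOk transformed_data x = true
instance (transformed_data : List (Int × List (String × List Int))) (n : Int) : Decidable (Pre_actors_with_bacon_number transformed_data n) := by unfold Pre_actors_with_bacon_number; infer_instance

def pvWitness_actors_with_bacon_number : (List (Int × List (String × List Int))) × Int :=
  ([(4724, [("actors", [5])]), (5, [("actors", [4724])])], 1)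

def Spec_actors_with_bacon_number (transformed_data : List (Int × List (String × List Int))) (n : Int) (out : List Int) : Prop := out = actors_with_bacon_number_alt transformed_data n
instance (transformed_data : List (Int × List (String × List Int))) (n : Int) (out : List Int) : Decidable (Spec_actors_with_bacon_number transformed_data n out) := by unfold Spec_actors_with_bacon_number; infer_instance

-- ===== CLAIM (what is proved, stated in full; the proofs are below) =====
def Claim_equal_actors_with_bacon_number : Prop := ∀ (transformed_data : List (Int × List (String × List Int))) (n : Int), Dom_actors_with_bacon_number transformed_data n → Pre_actors_with_bacon_number transformed_data n → Spec_actors_with_bacon_number transformed_data n (actors_with_bacon_number transformed_data n)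

-- ===== LEMMAS AND PROOFS =====

-- the common intermediate: BFS levels. pvLv td k = (frontier at distance k, dict of all actors
-- at distance ≤ k with their distances, both in discovery order)
def pvDStep (td : List (Int × List (String × List Int))) (v : Int)
    (st : PySem.Dict Int Int × List Int) (node : Int) : PySem.Dict Int Int × List Int :=
  (pvNbrs td node).foldl (fun st a =>
    if st.1.contains a then st else (st.1.insert a v, st.2 ++ [a])) st

def pvLv (td : List (Int × List (String × List Int))) : Nat → List Int × PySem.Dict Int Int
  | 0 => ([4724], PySem.Dict.ofList [(4724, 0)])
  | k+1 =>
      let st := ((pvLv td k).1).foldl (pvDStep td ((k : Int) + 1)) ((pvLv td k).2, [])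
      (st.2, st.1)

-- ---- generic facts about the dict-building folds ----

lemma pv_mem_items_update {κ ν : Type} [BEq κ] [LawfulBEq κ] :
    ∀ (l : List (κ × ν)) (d : PySem.Dict κ ν) (p : κ × ν),
      p ∈ (d.update l).items → p ∈ d.items ∨ p ∈ l := by
  intro l
  induction l with
  | nil => intro d p h; exact Or.inl h
  | cons x l ih =>
    intro d p h
    have h' : p ∈ ((d.insert x.1 x.2).update l).items := by
      simpa [PySem.Dict.update] using h
    rcases ih (d.insert x.1 x.2) p h' with h2 | h2
    · rcases (PySem.Dict.mem_items_insert d x.1 x.2 p).1 h2 with h3 | h3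
      · right; rw [h3]; simp
      · exact Or.inl h3.1
    · right; exact List.mem_cons_of_mem _ h2

lemma pv_mem_items_ofList {κ ν : Type} [BEq κ] [LawfulBEq κ]
    (l : List (κ × ν)) (p : κ × ν) (h : p ∈ (PySem.Dict.ofList l).items) : p ∈ l := by
  rcases pv_mem_items_update l PySem.Dict.empty p h with h2 | h2
  · simp [PySem.Dict.empty] at h2
  · exact h2

lemma pv_nbrs_sub_pool (td : List (Int × List (String × List Int))) (node : Int) :
    ∀ a ∈ pvNbrs td node, a ∈ pvPool td := by
  intro a ha
  unfold pvNbrs at ha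
  simp only [PySem.Dict.getD] at ha
  cases h1 : (PySem.Dict.ofList td).get? node with
  | none => rw [h1] at ha
            simp [PySem.Dict.ofList, PySem.Dict.update, PySem.Dict.empty, PySem.Dict.get?] at ha
  | some v =>
    rw [h1] at ha
    simp only [Option.getD_some] at ha
    have hv : (node, v) ∈ td :=
      pv_mem_items_ofList td _ (PySem.Dict.mem_items_of_get?_eq_some _ h1)
    cases h2 : (PySem.Dict.ofList v).get? "actors" with
    | none => rw [h2] at ha; simp at ha
    | some lst =>
      rw [h2] at ha
      simp only [Option.getD_some] at ha
      have hl : ("actors", lst) ∈ v :=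
        pv_mem_items_ofList v _ (PySem.Dict.mem_items_of_get?_eq_some _ h2)
      unfold pvPool
      refine List.mem_flatMap.2 ⟨(node, v), hv, ?_⟩
      exact List.mem_flatMap.2 ⟨("actors", lst), hl, ha⟩

-- one inner fold (over one neighbour list): appends a fresh block 'new' to both components
lemma pv_foldB_shape (v : Int) :
    ∀ (l : List Int) (D : PySem.Dict Int Int) (q : List Int),
      ∃ new : List Int,
        l.foldl (fun st a => if st.1.contains a then st
            else (st.1.insert a v, st.2 ++ [a])) (D, q)
          = (new.foldl (fun d a => d.insert a v) D, q ++ new)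
        ∧ new.Nodup ∧ ∀ a ∈ new, a ∈ l ∧ D.contains a = false := by
  intro l
  induction l with
  | nil => intro D q; exact ⟨[], by simp, by simp, by simp⟩
  | cons a l ih =>
    intro D q
    by_cases hc : D.contains a = true
    · obtain ⟨new, h1, h2, h3⟩ := ih D q
      refine ⟨new, ?_, h2, ?_⟩
      · simpa [hc] using h1
      · intro b hb; exact ⟨List.mem_cons_of_mem _ (h3 b hb).1, (h3 b hb).2⟩
    · rw [Bool.not_eq_true] at hc
      obtain ⟨new, h1, h2, h3⟩ := ih (D.insert a v) (q ++ [a])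
      refine ⟨a :: new, ?_, ?_, ?_⟩
      · simpa [hc, List.append_assoc] using h1
      · refine List.nodup_cons.2 ⟨?_, h2⟩
        intro hmem
        have := (h3 a hmem).2
        rw [PySem.Dict.contains_insert] at this
        simp at this
      · intro b hb
        rcases List.mem_cons.1 hb with rfl | hb'
        · exact ⟨List.mem_cons_self, hc⟩
        · have hfresh := (h3 b hb').2
          simp only [PySem.Dict.contains_insert, Bool.or_eq_false_iff] at hfresh
          exact ⟨List.mem_cons_of_mem _ (h3 b hb').1, hfresh.2⟩

lemma pv_foldB_q_shift (v : Int) :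
    ∀ (l : List Int) (D : PySem.Dict Int Int) (q : List Int),
      l.foldl (fun st a => if st.1.contains a then st
          else (st.1.insert a v, st.2 ++ [a])) (D, q)
        = ((l.foldl (fun st a => if st.1.contains a then st
            else (st.1.insert a v, st.2 ++ [a])) (D, ([] : List Int))).1,
           q ++ (l.foldl (fun st a => if st.1.contains a then st
            else (st.1.insert a v, st.2 ++ [a])) (D, ([] : List Int))).2) := by
  intro l
  induction l with
  | nil => intro D q; simp
  | cons a l ih =>
    intro D q
    by_cases hc : D.contains a = true
    · simpa [hc] using ih D q
    · rw [Bool.not_eq_true] at hc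
      simp only [List.foldl_cons, hc, Bool.false_eq_true, if_false]
      rw [ih (D.insert a v) (q ++ [a]), ih (D.insert a v) ([] ++ [a])]
      simp

-- inserting a fresh nodup block preserves lookups of existing keys
lemma pv_foldIns_getD (v c x : Int) :
    ∀ (new : List Int) (D : PySem.Dict Int Int), D.contains x = true → new.Nodup →
      (∀ a ∈ new, D.contains a = false) →
      (new.foldl (fun d a => d.insert a v) D).getD x c = D.getD x c := by
  intro new
  induction new with
  | nil => intro D _ _ _; rfl
  | cons a new ih =>
    intro D hx hnd hfresh
    have hax : x ≠ a := by
      intro h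
      have := hfresh a List.mem_cons_self
      rw [← h, hx] at this; exact absurd this (by simp)
    have h1 : (D.insert a v).contains x = true := by
      simp [PySem.Dict.contains_insert, hx]
    have h2 : ∀ b ∈ new, (D.insert a v).contains b = false := by
      intro b hb
      have hba : b ≠ a := by
        intro h; exact (List.nodup_cons.1 hnd).1 (h ▸ hb)
      simp [PySem.Dict.contains_insert, hba, hfresh b (List.mem_cons_of_mem _ hb)]
    rw [List.foldl_cons, ih (D.insert a v) h1 (List.nodup_cons.1 hnd).2 h2,
      PySem.Dict.getD_insert_of_ne D v c hax]

lemma pv_foldIns_contains (v x : Int) :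
    ∀ (new : List Int) (D : PySem.Dict Int Int), D.contains x = true →
      (new.foldl (fun d a => d.insert a v) D).contains x = true := by
  intro new
  induction new with
  | nil => intro D hx; exact hx
  | cons a new ih =>
    intro D hx
    rw [List.foldl_cons]
    exact ih (D.insert a v) (by simp [PySem.Dict.contains_insert, hx])

-- one whole level (fold of pvDStep over the frontier): same shape
lemma pv_levelFold_shape (td : List (Int × List (String × List Int))) (v : Int) :
    ∀ (nodes : List Int) (D : PySem.Dict Int Int) (q : List Int),
      ∃ new : List Int,
        nodes.foldl (pvDStep td v) (D, q)
          = (new.foldl (fun d a => d.insert a v) D, q ++ new)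
        ∧ new.Nodup ∧ ∀ a ∈ new, a ∈ pvPool td ∧ D.contains a = false := by
  intro nodes
  induction nodes with
  | nil => intro D q; exact ⟨[], by simp, by simp, by simp⟩
  | cons node nodes ih =>
    intro D q
    obtain ⟨e, hE, hEnd, hEc⟩ := pv_foldB_shape v (pvNbrs td node) D q
    obtain ⟨new, h1, h2, h3⟩ := ih (e.foldl (fun d a => d.insert a v) D) (q ++ e)
    refine ⟨e ++ new, ?_, ?_, ?_⟩
    · rw [List.foldl_cons]
      show nodes.foldl (pvDStep td v) (pvDStep td v (D, q) node) = _
      rw [show pvDStep td v (D, q) node = (e.foldl (fun d a => d.insert a v) D, q ++ e) from hE,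
        h1, List.foldl_append, List.append_assoc]
    · refine List.Nodup.append hEnd h2 (List.disjoint_left.2 ?_)
      intro b hb hbnew
      have := (h3 b hbnew).2
      rw [PySem.Dict.contains_eq_decide_mem_keys,
        PySem.Dict.keys_foldl_insert e (fun _ _ => v) D] at this
      simp [PySem.Set.mem_update, hb] at this
    · intro b hb
      rcases List.mem_append.1 hb with hb' | hb'
      · exact ⟨pv_nbrs_sub_pool td node b (hEc b hb').1, (hEc b hb').2⟩
      · refine ⟨(h3 b hb').1, ?_⟩
        by_contra hD
        rw [Bool.not_eq_false] at hD
        have := pv_foldIns_contains v b e D hD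
        rw [(h3 b hb').2] at this
        exact absurd this (by simp)

lemma pv_levelFold_q_shift (td : List (Int × List (String × List Int))) (v : Int) :
    ∀ (nodes : List Int) (D : PySem.Dict Int Int) (q : List Int),
      nodes.foldl (pvDStep td v) (D, q)
        = ((nodes.foldl (pvDStep td v) (D, ([] : List Int))).1,
           q ++ (nodes.foldl (pvDStep td v) (D, ([] : List Int))).2) := by
  intro nodes
  induction nodes with
  | nil => intro D q; simp
  | cons node nodes ih =>
    intro D q
    simp only [List.foldl_cons]
    rw [show pvDStep td v (D, q) node = ((pvDStep td v (D, ([] : List Int)) node).1,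
        q ++ (pvDStep td v (D, ([] : List Int)) node).2) from by
      unfold pvDStep
      rw [pv_foldB_q_shift v (pvNbrs td node) D q]]
    rcases hD : pvDStep td v (D, ([] : List Int)) node with ⟨D1, e⟩
    rw [ih D1 (q ++ e), ih D1 e]
    simp

-- ---- relating A's set-pair fold to the dict-pair fold ----

lemma pv_stepAB (v : Int) :
    ∀ (l : List Int) (A P : PySem.Set Int) (D : PySem.Dict Int Int) (q : List Int),
      A = q → P = D.keys → (∀ x ∈ A, x ∈ P) →
      (l.foldl (fun st a => if PySem.Set.contains st.2 a then st
          else (PySem.Set.add st.1 a, PySem.Set.add st.2 a)) (A, P)).1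
        = (l.foldl (fun st a => if st.1.contains a then st
          else (st.1.insert a v, st.2 ++ [a])) (D, q)).2
      ∧ (l.foldl (fun st a => if PySem.Set.contains st.2 a then st
          else (PySem.Set.add st.1 a, PySem.Set.add st.2 a)) (A, P)).2
        = (l.foldl (fun st a => if st.1.contains a then st
          else (st.1.insert a v, st.2 ++ [a])) (D, q)).1.keys
      ∧ (∀ x ∈ (l.foldl (fun st a => if PySem.Set.contains st.2 a then st
          else (PySem.Set.add st.1 a, PySem.Set.add st.2 a)) (A, P)).1,
         x ∈ (l.foldl (fun st a => if PySem.Set.contains st.2 a then st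
          else (PySem.Set.add st.1 a, PySem.Set.add st.2 a)) (A, P)).2) := by
  intro l
  induction l with
  | nil => intro A P D q hA hP hInv; exact ⟨hA, hP, hInv⟩
  | cons a l ih =>
    intro A P D q hA hP hInv
    simp only [List.foldl_cons]
    by_cases hm : a ∈ P
    · rw [if_pos (by rw [(PySem.Set.contains_iff P a)]; exact hm),
        if_pos (by rw [PySem.Dict.contains_eq_decide_mem_keys, ← hP]; simpa using hm)]
      exact ih A P D q hA hP hInv
    · have hcS : ¬ PySem.Set.contains P a = true := by rw [PySem.Set.contains_iff]; exact hm
      have hcD : (D.contains a = true) = False := by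
        rw [PySem.Dict.contains_eq_decide_mem_keys, ← hP]; simpa using hm
      rw [if_neg hcS, if_neg (by rw [hcD]; exact id)]
      have haA : a ∉ A := fun h => hm (hInv a h)
      refine ih (A.add a) (P.add a) (D.insert a v) (q ++ [a]) ?_ ?_ ?_
      · rw [PySem.Set.add_of_not_mem haA, hA]
      · rw [PySem.Set.add_of_not_mem hm, hP,
          PySem.Dict.keys_insert_of_not_contains D v (by
            rw [← Bool.not_eq_true, hcD]; exact id)]
      · intro x hx
        rw [PySem.Set.add_of_not_mem haA] at hx
        rw [PySem.Set.add_of_not_mem hm]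
        rcases List.mem_append.1 hx with h | h
        · exact List.mem_append.2 (Or.inl (hInv x h))
        · exact List.mem_append.2 (Or.inr h)

lemma pv_levelAB (td : List (Int × List (String × List Int))) (v : Int) :
    ∀ (nodes : List Int) (A P : PySem.Set Int) (D : PySem.Dict Int Int) (q : List Int),
      A = q → P = D.keys → (∀ x ∈ A, x ∈ P) →
      (pvLevelA td nodes (A, P)).1 = (nodes.foldl (pvDStep td v) (D, q)).2
      ∧ (pvLevelA td nodes (A, P)).2 = (nodes.foldl (pvDStep td v) (D, q)).1.keys
      ∧ (∀ x ∈ (pvLevelA td nodes (A, P)).1, x ∈ (pvLevelA td nodes (A, P)).2) := by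
  intro nodes
  induction nodes with
  | nil => intro A P D q hA hP hInv; exact ⟨hA, hP, hInv⟩
  | cons node nodes ih =>
    intro A P D q hA hP hInv
    obtain ⟨g1, g2, g3⟩ := pv_stepAB v (pvNbrs td node) A P D q hA hP hInv
    unfold pvLevelA
    simp only [List.foldl_cons]
    exact ih _ _ _ _ g1 g2 g3

-- ---- facts about the levels ----

lemma pv_lv_zero (td : List (Int × List (String × List Int))) :
    pvLv td 0 = ([(4724 : Int)], PySem.Dict.ofList [((4724 : Int), (0 : Int))]) := rfl

-- one level step: the next frontier is a fresh nodup block and the dict grows by exactly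
-- its pairs at value k+1
lemma pv_lv_step (td : List (Int × List (String × List Int))) (k : Nat) :
    (pvLv td (k+1)).2.items
      = (pvLv td k).2.items ++ ((pvLv td (k+1)).1).map (fun a => (a, (k : Int) + 1))
    ∧ (pvLv td (k+1)).1.Nodup
    ∧ ∀ a ∈ (pvLv td (k+1)).1, a ∈ pvPool td ∧ (pvLv td k).2.contains a = false := by
  obtain ⟨new, h1, h2, h3⟩ :=
    pv_levelFold_shape td ((k : Int) + 1) ((pvLv td k).1) ((pvLv td k).2) []
  have hfr : (pvLv td (k+1)).1 = new := by
    show (((pvLv td k).1).foldl (pvDStep td ((k : Int) + 1)) ((pvLv td k).2, [])).2 = new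
    rw [h1]; simp
  have hdict : (pvLv td (k+1)).2
      = new.foldl (fun d a => d.insert a ((k : Int) + 1)) (pvLv td k).2 := by
    show (((pvLv td k).1).foldl (pvDStep td ((k : Int) + 1)) ((pvLv td k).2, [])).1 = _
    rw [h1]
  refine ⟨?_, by rw [hfr]; exact h2, by rw [hfr]; exact h3⟩
  rw [hfr, hdict]
  have := PySem.Dict.items_foldl_insert_fresh new (fun a => a) (fun _ => (k : Int) + 1)
    (pvLv td k).2 (fun a ha => (h3 a ha).2) (by simpa using h2)
  simpa using this

lemma pv_lv_items (td : List (Int × List (String × List Int))) (k : Nat) :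
    (pvLv td (k+1)).2.items
      = (pvLv td k).2.items ++ ((pvLv td (k+1)).1).map (fun a => (a, (k : Int) + 1)) := by
  exact (pv_lv_step td k).1

lemma pv_lv_keys (td : List (Int × List (String × List Int))) (k : Nat) :
    (pvLv td (k+1)).2.keys = (pvLv td k).2.keys ++ (pvLv td (k+1)).1 := by
  show ((pvLv td (k+1)).2.items).map (fun p => p.1) = _
  rw [pv_lv_items td k]
  simp [PySem.Dict.keys, Function.comp_def]

lemma pv_lv_keys_nodup (td : List (Int × List (String × List Int))) :
    ∀ k, (pvLv td k).2.keys.Nodup := by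
  intro k
  induction k with
  | zero => rw [pv_lv_zero]; decide
  | succ k ih =>
    rw [pv_lv_keys td k]
    refine List.Nodup.append ih (pv_lv_step td k).2.1 (List.disjoint_left.2 ?_)
    intro a ha hfr
    have := ((pv_lv_step td k).2.2 a hfr).2
    rw [PySem.Dict.contains_eq_decide_mem_keys] at this
    simp [ha] at this

lemma pv_lv_frontier_contains (td : List (Int × List (String × List Int))) :
    ∀ k, ∀ x ∈ (pvLv td k).1, (pvLv td k).2.contains x = true := by
  intro k x hx
  rw [PySem.Dict.contains_eq_decide_mem_keys]
  cases k with
  | zero =>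
    rw [pv_lv_zero] at hx ⊢
    simp at hx
    subst hx
    decide
  | succ k => rw [pv_lv_keys td k]; simp [hx]

lemma pv_lv_frontier_getD (td : List (Int × List (String × List Int))) :
    ∀ k, ∀ x ∈ (pvLv td k).1, (pvLv td k).2.getD x 0 = (k : Int) := by
  intro k x hx
  cases k with
  | zero =>
    rw [pv_lv_zero] at hx
    simp at hx
    subst hx
    rw [pv_lv_zero]
    decide
  | succ k =>
    refine PySem.Dict.getD_of_mem_items (pvLv td (k+1)).2 ?_ (pv_lv_keys_nodup td (k+1)) 0
    rw [pv_lv_items td k]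
    refine List.mem_append.2 (Or.inr ?_)
    have : ((k : Nat) + 1 : Int) = (k : Int) + 1 := by omega
    rw [this]
    exact List.mem_map.2 ⟨x, hx, rfl⟩

lemma pv_lv_value_le (td : List (Int × List (String × List Int))) :
    ∀ k, ∀ p ∈ (pvLv td k).2.items, p.2 ≤ (k : Int) := by
  intro k
  induction k with
  | zero =>
    intro p hp
    rw [pv_lv_zero] at hp
    have hp' : p = ((4724 : Int), (0 : Int)) := by
      have : (PySem.Dict.ofList [((4724 : Int), (0 : Int))]).items
          = [((4724 : Int), (0 : Int))] := by decide
      rw [this] at hp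
      simpa using hp
    rw [hp']; simp
  | succ k ih =>
    intro p hp
    rw [pv_lv_items td k] at hp
    rcases List.mem_append.1 hp with h | h
    · have := ih p h; omega
    · rcases List.mem_map.1 h with ⟨a, _, rfl⟩
      show ((k : Int) + 1) ≤ ((k + 1 : Nat) : Int)
      push_cast; omega

lemma pv_lv_frontier_nodup (td : List (Int × List (String × List Int))) :
    ∀ k, (pvLv td k).1.Nodup := by
  intro k
  cases k with
  | zero => rw [pv_lv_zero]; decide
  | succ k => exact (pv_lv_step td k).2.1

lemma pv_lv_nil_stable (td : List (Int × List (String × List Int))) (k : Nat)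
    (h : (pvLv td k).1 = []) : ∀ j, (pvLv td (k+j)).1 = [] ∧ (pvLv td (k+j)).2 = (pvLv td k).2 := by
  intro j
  induction j with
  | zero => exact ⟨h, rfl⟩
  | succ j ih =>
    have : pvLv td (k+j+1)
        = ((((pvLv td (k+j)).1).foldl (pvDStep td ((((k+j) : Nat) : Int) + 1))
            ((pvLv td (k+j)).2, [])).2,
           (((pvLv td (k+j)).1).foldl (pvDStep td ((((k+j) : Nat) : Int) + 1))
            ((pvLv td (k+j)).2, [])).1) := rfl
    rw [show k + (j+1) = (k+j) + 1 from rfl, this, ih.1]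
    simpa using ih.2

lemma pv_lv_size (td : List (Int × List (String × List Int))) (k : Nat) :
    (pvLv td (k+1)).2.size = (pvLv td k).2.size + (pvLv td (k+1)).1.length := by
  show ((pvLv td (k+1)).2.items).length = ((pvLv td k).2.items).length + _
  rw [pv_lv_items td k]
  simp

lemma pv_lv_size_mono (td : List (Int × List (String × List Int))) (k : Nat) :
    ∀ j, (pvLv td k).2.size ≤ (pvLv td (k+j)).2.size := by
  intro j
  induction j with
  | zero => exact le_refl _
  | succ j ih =>
    rw [show k + (j+1) = (k+j) + 1 from rfl, pv_lv_size td (k+j)]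
    omega

lemma pv_lv_keys_sub (td : List (Int × List (String × List Int))) :
    ∀ k, ∀ x ∈ (pvLv td k).2.keys, x = 4724 ∨ x ∈ pvPool td := by
  intro k
  induction k with
  | zero =>
    intro x hx
    left
    rw [pv_lv_zero] at hx
    have : (PySem.Dict.ofList [((4724 : Int), (0 : Int))]).keys = [(4724 : Int)] := by decide
    rw [this] at hx; simpa using hx
  | succ k ih =>
    intro x hx
    rw [pv_lv_keys td k] at hx
    rcases List.mem_append.1 hx with h | h
    · exact ih x h
    · exact Or.inr ((pv_lv_step td k).2.2 x h).1

lemma pv_lv_size_le (td : List (Int × List (String × List Int))) (k : Nat) :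
    (pvLv td k).2.size ≤ (pvPool td).length + 1 := by
  have h1 : (pvLv td k).2.size = ((pvLv td k).2.keys).length := by
    show ((pvLv td k).2.items).length = (((pvLv td k).2.items).map (fun p => p.1)).length
    simp
  have h2 : ((pvLv td k).2.keys).length = ((pvLv td k).2.keys).toFinset.card :=
    (List.toFinset_card_of_nodup (pv_lv_keys_nodup td k)).symm
  have h3 : ((pvLv td k).2.keys).toFinset ⊆ insert (4724 : Int) (pvPool td).toFinset := by
    intro x hx
    rcases pv_lv_keys_sub td k x (List.mem_toFinset.1 hx) with h | h
    · simp [h]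
    · simp [h]
  have h4 := Finset.card_le_card h3
  have h5 := Finset.card_insert_le (4724 : Int) (pvPool td).toFinset
  have h6 := List.toFinset_card_le (pvPool td)
  omega

lemma pv_lv_size_pos (td : List (Int × List (String × List Int))) (k : Nat) :
    1 ≤ (pvLv td k).2.size := by
  have := pv_lv_size_mono td 0 k
  simpa using this

lemma pv_lv_filter (td : List (Int × List (String × List Int))) (m : Nat) :
    ((pvLv td m).2.items.filter (fun p => p.2 == (m : Int))).map (fun p => p.1)
      = (pvLv td m).1 := by
  cases m with
  | zero => rw [pv_lv_zero]; decide
  | succ m =>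
    rw [pv_lv_items td m, List.filter_append]
    have hpre : ((pvLv td m).2.items.filter (fun p => p.2 == ((m+1 : Nat) : Int))) = [] := by
      rw [List.filter_eq_nil_iff]
      intro p hp
      have := pv_lv_value_le td m p hp
      simp only [beq_iff_eq]
      push_cast
      omega
    have hsuf : (((pvLv td (m+1)).1).map (fun a => (a, (m : Int) + 1))).filter
        (fun p => p.2 == ((m+1 : Nat) : Int))
        = ((pvLv td (m+1)).1).map (fun a => (a, (m : Int) + 1)) := by
      rw [List.filter_eq_self]
      intro p hp
      rcases List.mem_map.1 hp with ⟨a, _, rfl⟩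
      simp only [beq_iff_eq]
      push_cast
      ring
    rw [hpre, hsuf]
    simp [Function.comp_def]

-- ---- running B's queue over the levels ----

lemma pv_bfs_nil (td : List (Int × List (String × List Int))) (n : Int) :
    ∀ (g : Nat) (D : PySem.Dict Int Int), pvBfs td n g [] D = D := by
  intro g D
  cases g with
  | zero => rfl
  | succ g => rfl

lemma pv_bfs_consume (td : List (Int × List (String × List Int))) (n : Int) :
    ∀ (q : List Int) (D : PySem.Dict Int Int) (g : Nat),
      (∀ x ∈ q, ¬(D.getD x 0 < n)) → pvBfs td n (q.length + g) q D = D := by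
  intro q
  induction q with
  | nil => intro D g _; simpa using pv_bfs_nil td n g D
  | cons x q ih =>
    intro D g hq
    rw [List.length_cons, show q.length + 1 + g = (q.length + g) + 1 from by omega]
    show (if D.getD x 0 < n then _ else pvBfs td n (q.length + g) q D) = D
    rw [if_neg (hq x List.mem_cons_self)]
    exact ih D g (fun y hy => hq y (List.mem_cons_of_mem _ hy))

lemma pv_bfs_pass (td : List (Int × List (String × List Int))) (n : Int) (k : Nat)
    (hk : (k : Int) < n) :
    ∀ (rest acc : List Int) (D : PySem.Dict Int Int) (g : Nat),
      (∀ x ∈ rest, D.getD x 0 = (k : Int) ∧ D.contains x = true) →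
      pvBfs td n (rest.length + g) (rest ++ acc) D
        = pvBfs td n g (acc ++ (rest.foldl (pvDStep td ((k : Int) + 1)) (D, [])).2)
            (rest.foldl (pvDStep td ((k : Int) + 1)) (D, [])).1 := by
  intro rest
  induction rest with
  | nil => intro acc D g _; simp
  | cons node rest ih =>
    intro acc D g hrest
    obtain ⟨e, hE, hEnd, hEc⟩ := pv_foldB_shape ((k : Int) + 1) (pvNbrs td node) D []
    have hgetD : D.getD node 0 = (k : Int) := (hrest node List.mem_cons_self).1
    rw [List.length_cons, show rest.length + 1 + g = (rest.length + g) + 1 from by omega,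
      List.cons_append]
    show (if D.getD node 0 < n then
        pvBfs td n (rest.length + g)
          ((rest ++ acc) ++ ((pvNbrs td node).foldl
            (fun st a => if st.1.contains a then st
              else (st.1.insert a (D.getD node 0 + 1), st.2 ++ [a])) (D, ([] : List Int))).2)
          ((pvNbrs td node).foldl
            (fun st a => if st.1.contains a then st
              else (st.1.insert a (D.getD node 0 + 1), st.2 ++ [a])) (D, ([] : List Int))).1
      else pvBfs td n (rest.length + g) (rest ++ acc) D) = _
    rw [hgetD, if_pos hk, hE]
    simp only [List.nil_append]
    have hD1c : ∀ x ∈ rest,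
        (e.foldl (fun d a => d.insert a ((k : Int) + 1)) D).getD x 0 = (k : Int)
        ∧ (e.foldl (fun d a => d.insert a ((k : Int) + 1)) D).contains x = true := by
      intro x hx
      refine ⟨?_, pv_foldIns_contains _ x e D (hrest x (List.mem_cons_of_mem _ hx)).2⟩
      rw [pv_foldIns_getD _ 0 x e D (hrest x (List.mem_cons_of_mem _ hx)).2 hEnd
        (fun a ha => (hEc a ha).2)]
      exact (hrest x (List.mem_cons_of_mem _ hx)).1
    rw [List.append_assoc, ih (acc ++ e) _ g hD1c]
    have hstep : (node :: rest).foldl (pvDStep td ((k : Int) + 1)) (D, ([] : List Int))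
        = rest.foldl (pvDStep td ((k : Int) + 1))
            (e.foldl (fun d a => d.insert a ((k : Int) + 1)) D, e) := by
      rw [List.foldl_cons]
      have h0 : pvDStep td ((k : Int) + 1) (D, ([] : List Int)) node
          = (e.foldl (fun d a => d.insert a ((k : Int) + 1)) D, e) := by
        unfold pvDStep
        rw [hE]
        simp
      rw [h0]
    rw [hstep, pv_levelFold_q_shift td ((k : Int) + 1) rest
      (e.foldl (fun d a => d.insert a ((k : Int) + 1)) D) e]
    simp [List.append_assoc]

lemma pv_bfs_levels (td : List (Int × List (String × List Int))) (n : Int) (hn : 0 ≤ n) :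
    ∀ (m k : Nat) (g : Nat), k + m = n.toNat →
      pvBfs td n ((pvLv td (k+m)).2.size - (pvLv td k).2.size + (pvLv td k).1.length + g)
          ((pvLv td k).1) ((pvLv td k).2)
        = (pvLv td (k+m)).2 := by
  intro m
  induction m with
  | zero =>
    intro k g hk
    simp only [Nat.add_zero, Nat.sub_self, Nat.zero_add]
    refine pv_bfs_consume td n ((pvLv td k).1) ((pvLv td k).2) g ?_
    intro x hx
    rw [pv_lv_frontier_getD td k x hx]
    omega
  | succ m ih =>
    intro k g hk
    have hklt : (k : Int) < n := by
      have h1 : k < n.toNat := by omega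
      have := Int.toNat_of_nonneg hn
      omega
    have hsz1 : (pvLv td (k+1)).2.size = (pvLv td k).2.size + (pvLv td (k+1)).1.length :=
      pv_lv_size td k
    have hszm : (pvLv td (k+1)).2.size ≤ (pvLv td (k+(m+1))).2.size := by
      have := pv_lv_size_mono td (k+1) m
      rw [show k + 1 + m = k + (m+1) from by omega] at this
      exact this
    have harith : (pvLv td (k+(m+1))).2.size - (pvLv td k).2.size + (pvLv td k).1.length + g
        = (pvLv td k).1.length +
          ((pvLv td (k+(m+1))).2.size - (pvLv td (k+1)).2.size + (pvLv td (k+1)).1.length + g) := by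
      omega
    have hpass := pv_bfs_pass td n k hklt ((pvLv td k).1) [] ((pvLv td k).2)
      ((pvLv td (k+(m+1))).2.size - (pvLv td (k+1)).2.size + (pvLv td (k+1)).1.length + g)
      (fun x hx => ⟨pv_lv_frontier_getD td k x hx, pv_lv_frontier_contains td k x hx⟩)
    rw [List.append_nil] at hpass
    rw [harith, hpass]
    have hfr : (((pvLv td k).1).foldl (pvDStep td ((k : Int) + 1)) ((pvLv td k).2, [])).2
        = (pvLv td (k+1)).1 := rfl
    have hdi : (((pvLv td k).1).foldl (pvDStep td ((k : Int) + 1)) ((pvLv td k).2, [])).1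
        = (pvLv td (k+1)).2 := rfl
    rw [hfr, hdi, List.nil_append, show k + (m+1) = k + 1 + m from by omega]
    exact ih (k+1) g (by omega)

-- ---- running A's loop over the levels ----

lemma pv_loopA_pos (td : List (Int × List (String × List Int))) :
    ∀ (m : Nat) (k : Nat) (f : Nat), m ≤ f →
      pvLoopA td f (m : Int) ((pvLv td k).1) ((pvLv td k).2.keys) ((pvLv td k).1)
        = (pvLv td (k+m)).1 := by
  intro m
  induction m with
  | zero =>
    intro k f _
    cases f with
    | zero => simp [pvLoopA]
    | succ f => simp [pvLoopA]
  | succ m ih =>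
    intro k f hf
    cases f with
    | zero => omega
    | succ f =>
      have hne : ((m + 1 : Nat) : Int) ≠ 0 := by
        push_cast; omega
      show (if ((m + 1 : Nat) : Int) = 0 then _ else _) = _
      rw [if_neg hne]
      by_cases hF : (pvLv td k).1 = ([] : List Int)
      · rw [if_pos hF, (pv_lv_nil_stable td k hF (m+1)).1]
        rfl
      · rw [if_neg hF]
        obtain ⟨g1, g2, g3⟩ := pv_levelAB td ((k : Int) + 1) ((pvLv td k).1)
          PySem.Set.empty ((pvLv td k).2.keys) ((pvLv td k).2) [] rfl rfl (by simp [PySem.Set.empty])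
        simp only []
        rw [g1, g2]
        have hfr : (((pvLv td k).1).foldl (pvDStep td ((k : Int) + 1)) ((pvLv td k).2, [])).2
            = (pvLv td (k+1)).1 := rfl
        have hdi : (((pvLv td k).1).foldl (pvDStep td ((k : Int) + 1)) ((pvLv td k).2, [])).1
            = (pvLv td (k+1)).2 := rfl
        rw [hfr, hdi, show ((m + 1 : Nat) : Int) - 1 = ((m : Nat) : Int) from by push_cast; ring,
          ih (k+1) f (by omega), show k + 1 + m = k + (m+1) from by omega]

lemma pv_foldA_shape :
    ∀ (l : List Int) (A P : PySem.Set Int), (∀ x ∈ A, x ∈ P) →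
      ∃ new : List Int,
        l.foldl (fun st a => if PySem.Set.contains st.2 a then st
            else (PySem.Set.add st.1 a, PySem.Set.add st.2 a)) (A, P)
          = (A ++ new, P ++ new)
        ∧ new.Nodup ∧ ∀ a ∈ new, a ∈ l ∧ a ∉ P := by
  intro l
  induction l with
  | nil => intro A P _; exact ⟨[], by simp, by simp, by simp⟩
  | cons a l ih =>
    intro A P hInv
    simp only [List.foldl_cons]
    by_cases hm : a ∈ P
    · rw [if_pos (by rw [PySem.Set.contains_iff]; exact hm)]
      obtain ⟨new, h1, h2, h3⟩ := ih A P hInv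
      exact ⟨new, h1, h2, fun b hb => ⟨List.mem_cons_of_mem _ (h3 b hb).1, (h3 b hb).2⟩⟩
    · rw [if_neg (by rw [PySem.Set.contains_iff]; exact hm)]
      have haA : a ∉ A := fun h => hm (hInv a h)
      rw [PySem.Set.add_of_not_mem haA, PySem.Set.add_of_not_mem hm]
      obtain ⟨new, h1, h2, h3⟩ := ih (A ++ [a]) (P ++ [a]) (by
        intro x hx
        rcases List.mem_append.1 hx with h | h
        · exact List.mem_append.2 (Or.inl (hInv x h))
        · exact List.mem_append.2 (Or.inr h))
      refine ⟨a :: new, ?_, ?_, ?_⟩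
      · rw [h1]; simp
      · refine List.nodup_cons.2 ⟨?_, h2⟩
        intro hmem
        exact (h3 a hmem).2 (List.mem_append.2 (Or.inr (by simp)))
      · intro b hb
        rcases List.mem_cons.1 hb with rfl | hb'
        · exact ⟨List.mem_cons_self, hm⟩
        · exact ⟨List.mem_cons_of_mem _ (h3 b hb').1,
            fun h => (h3 b hb').2 (List.mem_append.2 (Or.inl h))⟩

lemma pv_levelA_shape (td : List (Int × List (String × List Int))) :
    ∀ (nodes : List Int) (A P : PySem.Set Int), (∀ x ∈ A, x ∈ P) →
      ∃ new : List Int,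
        pvLevelA td nodes (A, P) = (A ++ new, P ++ new)
        ∧ new.Nodup ∧ ∀ a ∈ new, a ∈ pvPool td ∧ a ∉ P := by
  intro nodes
  induction nodes with
  | nil => intro A P _; exact ⟨[], by simp [pvLevelA], by simp, by simp⟩
  | cons node nodes ih =>
    intro A P hInv
    obtain ⟨e, hE, hEnd, hEc⟩ := pv_foldA_shape (pvNbrs td node) A P hInv
    obtain ⟨new, h1, h2, h3⟩ := ih (A ++ e) (P ++ e) (by
      intro x hx
      rcases List.mem_append.1 hx with h | h
      · exact List.mem_append.2 (Or.inl (hInv x h))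
      · exact List.mem_append.2 (Or.inr h))
    refine ⟨e ++ new, ?_, ?_, ?_⟩
    · unfold pvLevelA at h1 ⊢
      rw [List.foldl_cons]
      show nodes.foldl _ ((pvNbrs td node).foldl _ (A, P)) = _
      rw [hE, h1]
      simp [List.append_assoc]
    · refine List.Nodup.append hEnd h2 (List.disjoint_left.2 ?_)
      intro b hb hbnew
      exact (h3 b hbnew).2 (List.mem_append.2 (Or.inr hb))
    · intro b hb
      rcases List.mem_append.1 hb with h | h
      · exact ⟨pv_nbrs_sub_pool td node b (hEc b h).1, (hEc b h).2⟩
      · exact ⟨(h3 b h).1, fun hP => (h3 b h).2 (List.mem_append.2 (Or.inl hP))⟩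

lemma pv_loopA_neg (td : List (Int × List (String × List Int))) :
    ∀ (f : Nat) (n : Int) (nodes prev actors : PySem.Set Int), n < 0 →
      ((pvPool td).toFinset \ prev.toFinset).card + 2 ≤ f →
      pvLoopA td f n nodes prev actors = [] := by
  intro f
  induction f with
  | zero => intro n nodes prev actors _ hcard; omega
  | succ f ih =>
    intro n nodes prev actors hn hcard
    show (if n = 0 then actors else _) = []
    rw [if_neg (by omega)]
    by_cases hF : nodes = ([] : List Int)
    · rw [if_pos hF]; rfl
    · rw [if_neg hF]
      obtain ⟨new, h1, h2, h3⟩ := pv_levelA_shape td nodes PySem.Set.empty prev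
        (by simp [PySem.Set.empty])
      simp only []
      rw [h1]
      simp only [PySem.Set.empty, List.nil_append]
      by_cases hnew : new = ([] : List Int)
      · subst hnew
        cases f with
        | zero => omega
        | succ f2 =>
          show (if n - 1 = 0 then ([] : PySem.Set Int) else _) = []
          rw [if_neg (by omega), if_pos rfl]
          rfl
      · refine ih (n-1) new (prev ++ new) new (by omega) ?_
        obtain ⟨b, hb⟩ : ∃ b, b ∈ new := by
          cases new with
          | nil => exact absurd rfl hnew
          | cons b nb => exact ⟨b, List.mem_cons_self⟩
        have hbd : b ∈ (pvPool td).toFinset \ prev.toFinset := by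
          rw [Finset.mem_sdiff, List.mem_toFinset, List.mem_toFinset]
          exact ⟨(h3 b hb).1, (h3 b hb).2⟩
        have hsub : (pvPool td).toFinset \ (prev ++ new).toFinset
            ⊆ ((pvPool td).toFinset \ prev.toFinset).erase b := by
          intro x hx
          simp only [Finset.mem_sdiff, List.toFinset_append, Finset.mem_union,
            List.mem_toFinset, not_or] at hx
          simp only [Finset.mem_erase, Finset.mem_sdiff, List.mem_toFinset]
          exact ⟨fun hxb => hx.2.2 (hxb ▸ hb), hx.1, hx.2.1⟩
        have hlt := Finset.card_le_card hsub
        have herase := Finset.card_erase_of_mem hbd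
        have hpos : 0 < ((pvPool td).toFinset \ prev.toFinset).card :=
          Finset.card_pos.2 ⟨b, hbd⟩
        omega

-- ===== VERDICT (by name: the statement is the Claim_ definition above) =====
theorem actors_with_bacon_number_spec : Claim_equal_actors_with_bacon_number := by
  intro td n _ _
  unfold Spec_actors_with_bacon_number actors_with_bacon_number actors_with_bacon_number_alt
  simp only []
  by_cases hn : 0 ≤ n
  · -- n ≥ 0: both sides compute the frontier at distance n.toNat
    have hcast : ((n.toNat : Nat) : Int) = n := Int.toNat_of_nonneg hn
    have hA : pvLoopA td (n.toNat + (pvPool td).length + 2) n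
        (PySem.Set.ofList [4724]) (PySem.Set.ofList [4724]) (PySem.Set.ofList [4724])
        = (pvLv td n.toNat).1 := by
      have h := pv_loopA_pos td n.toNat 0 (n.toNat + (pvPool td).length + 2) (by omega)
      rw [hcast] at h
      simpa using h
    have hB : pvBfs td n ((pvPool td).length + 2) [4724] (PySem.Dict.ofList [(4724, 0)])
        = (pvLv td n.toNat).2 := by
      have hle := pv_lv_size_le td n.toNat
      have hpos := pv_lv_size_pos td n.toNat
      have h := pv_bfs_levels td n hn n.toNat 0
        ((pvPool td).length + 2 - (pvLv td n.toNat).2.size) (by omega)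
      rw [Nat.zero_add] at h
      have hsz0 : (pvLv td 0).2.size = 1 := by rw [pv_lv_zero]; decide
      have hlen0 : (pvLv td 0).1.length = 1 := by rw [pv_lv_zero]; rfl
      rw [show (pvLv td n.toNat).2.size - (pvLv td 0).2.size + (pvLv td 0).1.length
          + ((pvPool td).length + 2 - (pvLv td n.toNat).2.size)
          = (pvPool td).length + 2 from by rw [hsz0, hlen0]; omega] at h
      simpa using h
    rw [hA, hB, ← hcast, Int.toNat_natCast, pv_lv_filter td n.toNat,
      PySem.Set.ofList_eq_self_of_nodup _ (pv_lv_frontier_nodup td n.toNat)]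
  · -- n < 0: A's loop dies out returning the empty set, B never expands the start node
    replace hn : n < 0 := by omega
    have hA : pvLoopA td (n.toNat + (pvPool td).length + 2) n
        (PySem.Set.ofList [4724]) (PySem.Set.ofList [4724]) (PySem.Set.ofList [4724])
        = [] := by
      refine pv_loopA_neg td _ n _ _ _ hn ?_
      have h1 := Finset.card_le_card
        (Finset.sdiff_subset (s := (pvPool td).toFinset)
          (t := (PySem.Set.ofList [(4724 : Int)]).toFinset))
      have h2 := List.toFinset_card_le (pvPool td)
      omega
    have hB : pvBfs td n ((pvPool td).length + 2) [4724] (PySem.Dict.ofList [(4724, 0)])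
        = PySem.Dict.ofList [(4724, 0)] := by
      show (if (PySem.Dict.ofList [((4724 : Int), (0 : Int))]).getD 4724 0 < n then _
        else pvBfs td n ((pvPool td).length + 1) [] (PySem.Dict.ofList [(4724, 0)]))
        = PySem.Dict.ofList [(4724, 0)]
      rw [show (PySem.Dict.ofList [((4724 : Int), (0 : Int))]).getD 4724 0 = 0 from by decide,
        if_neg (by omega)]
      exact pv_bfs_nil td n _ _
    rw [hA, hB]
    rw [show (PySem.Dict.ofList [((4724 : Int), (0 : Int))]).items = [(4724, 0)] from by decide]
    rw [show List.filter (fun p => p.2 == n) [((4724 : Int), (0 : Int))] = [] from by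
      simp [show ¬((0 : Int) = n) from by omega]]
    rfl
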